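-- pv_equiv track=rewrite | github.com/RaeZlo/programming-logic-exercises | mathematics/intermediate/find_special_numbers.py | find_special_numbers
-- ===== SOURCE A (Python) =====
-- def find_special_numbers(a, b):
--     """
--     Esta función recibe dos números enteros, a y b, y retorna una lista de números en el rango [a, b]
--     que cumplen la propiedad especial descrita: la suma de cada uno de sus dígitos elevados a la potencia
--     de sus posiciones respectivas es igual al propio número.
--
--     Args:
--         a (int): El número inicial del rango.
--         b (int): El número final del rango.
--
--     Returns:
--         list: Una lista con los números en el rango [a, b] que cumplen la propiedad.
--     """
--     special_numbers = []
--
--     for num in range(a, b + 1):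
--         digits = str(num)
--         total_sum = sum(int(digit) ** (i + 1) for i, digit in enumerate(digits))
--
--         if total_sum == num:
--             special_numbers.append(num)
--
--     return special_numbers
-- ===== SOURCE B (Python) =====
-- def _digit_power_sum(n):
--     # number of decimal digits of n (n >= 0)
--     d, p = 1, 10
--     while p <= n:
--         d += 1
--         p *= 10
--     # digits right-to-left carry exponents d, d-1, ..., 1
--     s, m, e = 0, n, d
--     while e > 0:
--         s += (m % 10) ** e
--         m //= 10
--         e -= 1
--     return s
--
--
-- def find_special_numbers(a, b):
--     special_numbers = []
--     for num in range(a, b + 1):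
--         if _digit_power_sum(num) == num:
--             special_numbers.append(num)
--     return special_numbers
-- ===== Notes on version B (the rewrite author's own statement) =====
-- stated objective: alternative
-- what changed: B replaces A's per-number string conversion (str(num), enumerate, int(digit) per character) with pure integer arithmetic: a digit-count loop followed by right-to-left digit extraction via % and //, summing digit**exponent with decreasing exponents.
-- outside the precondition, e.g. on find_special_numbers(-2, 3): A raises ValueError, B returns [0, 1, 2, 3]
import Mathlib
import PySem

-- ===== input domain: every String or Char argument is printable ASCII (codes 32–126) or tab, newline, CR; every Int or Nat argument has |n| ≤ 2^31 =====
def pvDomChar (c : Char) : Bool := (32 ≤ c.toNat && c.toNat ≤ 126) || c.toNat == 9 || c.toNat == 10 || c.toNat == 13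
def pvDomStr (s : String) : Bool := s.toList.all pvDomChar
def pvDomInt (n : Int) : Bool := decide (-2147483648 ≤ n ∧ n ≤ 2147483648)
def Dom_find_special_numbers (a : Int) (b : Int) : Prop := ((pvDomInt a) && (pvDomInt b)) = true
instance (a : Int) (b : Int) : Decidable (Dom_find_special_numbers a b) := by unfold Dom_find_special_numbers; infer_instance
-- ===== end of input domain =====

-- B replaces A's string conversion (str + enumerate + int per character) by pure integer
-- arithmetic (a digit-count loop, then divmod digit extraction right-to-left); same asymptotic cost.

-- ===== PORT A =====
def find_special_numbers (a : Int) (b : Int) : List Int :=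
  (PySem.List.pyRange a (b + 1)).foldl
    (fun special_numbers num =>
      let digits := PySem.Int.toChars num
      -- int(digit): Python raises ValueError on the '-' of a negative num; Pre_ excludes
      -- those inputs, so the `.getD 0` default is never reached inside Pre_.
      let total_sum := ((PySem.List.enumerate digits).map
        (fun p => ((PySem.Int.ofChars? [p.2]).getD 0) ^ (p.1 + 1).toNat)).sum
      if total_sum = num then special_numbers ++ [num] else special_numbers) []

-- ===== PORT B =====
-- 'd, p = 1, 10; while p <= n: d += 1; p *= 10'  (the '1 ≤ p' conjunct is a pure
-- termination guard: every call has p a positive power of 10, so it never changes the result)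
def pvDigitCountLoop (n : Int) (p : Int) (d : Nat) : Nat :=
  if h : p ≤ n ∧ 1 ≤ p then pvDigitCountLoop n (p * 10) (d + 1) else d
  termination_by (n + 1 - p).toNat
  decreasing_by omega

-- 's, m, e = 0, n, d; while e > 0: s += (m % 10) ** e; m //= 10; e -= 1'
def pvSumLoop (s : Int) (m : Int) (e : Nat) : Int :=
  match e with
  | 0 => s
  | e' + 1 => pvSumLoop (s + (PySem.Int.mod m 10) ^ (e' + 1)) (PySem.Int.floordiv m 10) e'

def pvDigitPowerSum (n : Int) : Int := pvSumLoop 0 n (pvDigitCountLoop n 10 1)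

def find_special_numbers_alt (a : Int) (b : Int) : List Int :=
  (PySem.List.pyRange a (b + 1)).foldl
    (fun special_numbers num =>
      if pvDigitPowerSum num = num then special_numbers ++ [num] else special_numbers) []

-- ===== PRECONDITION & SPEC =====
-- Pre_ excludes exactly the inputs where A raises: a non-empty range starting below 0
-- makes int('-') raise ValueError on the first (negative) number.
def Pre_find_special_numbers (a : Int) (b : Int) : Prop := 0 ≤ a ∨ b < a
instance (a : Int) (b : Int) : Decidable (Pre_find_special_numbers a b) := by unfold Pre_find_special_numbers; infer_instance

def pvWitness_find_special_numbers : Int × Int := (0, 50)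

def Spec_find_special_numbers (a : Int) (b : Int) (out : List Int) : Prop := out = find_special_numbers_alt a b
instance (a : Int) (b : Int) (out : List Int) : Decidable (Spec_find_special_numbers a b out) := by unfold Spec_find_special_numbers; infer_instance

-- ===== CLAIM (what is proved, stated in full; the proofs are below) =====
def Claim_equal_find_special_numbers : Prop := ∀ (a : Int) (b : Int), Dom_find_special_numbers a b → Pre_find_special_numbers a b → Spec_find_special_numbers a b (find_special_numbers a b)

-- ===== LEMMAS AND PROOFS =====

-- value of a single decimal digit character under int()
lemma pv_charVal (k : Nat) (hk : k < 10) :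
    (PySem.Int.ofChars? [Nat.digitChar k]).getD 0 = (k : Int) := by
  interval_cases k <;> decide

-- core's toDigitsCore, on enough fuel, is the big-endian decimal digits
lemma pv_toDigitsCore_eq (fuel : Nat) : ∀ (n : Nat) (ds : List Char), 0 < n → n ≤ fuel →
    Nat.toDigitsCore 10 fuel n ds = ((Nat.digits 10 n).map Nat.digitChar).reverse ++ ds := by
  induction fuel with
  | zero => intro n ds h1 h2; omega
  | succ fuel ih =>
    intro n ds h1 h2
    rw [Nat.toDigitsCore]
    rw [Nat.digits_def' (by norm_num : (1:ℕ) < 10) h1]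
    by_cases h : n / 10 = 0
    · simp [h]
    · rw [if_neg h, ih (n / 10) _ (Nat.pos_of_ne_zero h)
        (by have := Nat.div_lt_self h1 (by norm_num : (1:ℕ) < 10); omega)]
      simp

lemma pv_toDigits_eq (n : Nat) (h : 0 < n) :
    Nat.toDigits 10 n = ((Nat.digits 10 n).map Nat.digitChar).reverse := by
  rw [Nat.toDigits, pv_toDigitsCore_eq (n + 1) n [] h (by omega), List.append_nil]

-- the per-number sum both programs compute, as a function of the little-endian digit list
def pvS (L : List Nat) : Int :=
  ((PySem.List.enumerate (L.reverse)).map (fun p => ((p.2 : Int)) ^ ((p.1 + 1).toNat))).sum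

lemma pvS_nil : pvS [] = 0 := by simp [pvS]

lemma pvS_cons (r : Nat) (t : List Nat) : pvS (r :: t) = pvS t + (r : Int) ^ (t.length + 1) := by
  unfold pvS
  rw [List.reverse_cons, PySem.List.enumerate_append, List.map_append, List.sum_append]
  simp [PySem.List.enumerate]

-- A's generator sum over the digit characters equals the digit-list sum
lemma pv_sumA_eq (M : List Nat) (hM : ∀ k ∈ M, k < 10) : ∀ (s : Int),
    ((PySem.List.enumerate (M.map Nat.digitChar) s).map
      (fun p => ((PySem.Int.ofChars? [p.2]).getD 0) ^ (p.1 + 1).toNat)).sum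
    = ((PySem.List.enumerate M s).map (fun p => ((p.2 : Int)) ^ ((p.1 + 1).toNat))).sum := by
  induction M with
  | nil => intro s; simp [PySem.List.enumerate]
  | cons r t ih =>
    intro s
    rw [List.map_cons, PySem.List.enumerate_cons, PySem.List.enumerate_cons]
    simp only [List.map_cons, List.sum_cons]
    rw [pv_charVal r (hM r (List.mem_cons_self)), ih (fun k hk => hM k (List.mem_cons_of_mem _ hk))]

-- B's divmod loop computes the digit-list sum
lemma pv_sumLoop_eq : ∀ (L : List Nat) (m : Nat) (s : Int), Nat.digits 10 m = L →
    pvSumLoop s (↑m) L.length = s + pvS L := by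
  intro L
  induction L with
  | nil => intro m s _; simp [pvSumLoop, pvS_nil]
  | cons r t ih =>
    intro m s hdig
    have hm : m ≠ 0 := by
      intro h0; rw [h0] at hdig; simp at hdig
    have hstep : Nat.digits 10 m = m % 10 :: Nat.digits 10 (m / 10) :=
      Nat.digits_def' (by norm_num) (Nat.pos_of_ne_zero hm)
    rw [hstep] at hdig
    obtain ⟨hr, ht⟩ : r = m % 10 ∧ Nat.digits 10 (m / 10) = t := by
      injection hdig with h1 h2; exact ⟨h1.symm, h2⟩
    show pvSumLoop s (↑m) (t.length + 1) = s + pvS (r :: t)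
    rw [pvSumLoop]
    have hmod : PySem.Int.mod (↑m) 10 = ((m % 10 : Nat) : Int) := by
      exact_mod_cast PySem.Int.mod_natCast m 10
    have hdiv : PySem.Int.floordiv (↑m) 10 = ((m / 10 : Nat) : Int) := by
      exact_mod_cast PySem.Int.floordiv_natCast m 10
    rw [hmod, hdiv, ih (m / 10) _ ht, pvS_cons, hr]
    push_cast
    ring

-- the digit-count loop: result, upper and lower bracket
lemma pv_countLoop_spec : ∀ (n p : Int) (d : Nat), 1 ≤ p →
    ∃ k, pvDigitCountLoop n p d = d + k ∧ n < p * 10 ^ k ∧ (k = 0 ∨ p * 10 ^ (k - 1) ≤ n) := by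
  intro n p d hp
  fun_induction pvDigitCountLoop n p d with
  | case1 p d h ih =>
    obtain ⟨k', he, hlt, hge⟩ := ih (by linarith)
    refine ⟨k' + 1, by rw [he]; omega, ?_, Or.inr ?_⟩
    · calc n < p * 10 * 10 ^ k' := hlt
        _ = p * 10 ^ (k' + 1) := by ring
    · rcases Nat.eq_zero_or_pos k' with hk0 | hkpos
      · subst hk0; simpa using h.1
      · obtain ⟨j, rfl⟩ : ∃ j, k' = j + 1 := ⟨k' - 1, by omega⟩
        rcases hge with h0 | hge'
        · omega
        · calc p * 10 ^ (j + 1 + 1 - 1) = p * 10 * 10 ^ (j + 1 - 1) := by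
                simp [pow_succ]; ring
            _ ≤ n := hge'
  | case2 p d h =>
    refine ⟨0, by omega, ?_, Or.inl rfl⟩
    have hnp : ¬ p ≤ n := fun hle => h ⟨hle, hp⟩
    calc n < p := by omega
      _ = p * 10 ^ 0 := by ring

lemma pv_count_eq_len (m : Nat) (h : 0 < m) :
    pvDigitCountLoop (↑m) 10 1 = (Nat.digits 10 m).length := by
  obtain ⟨k, he, hlt, hge⟩ := pv_countLoop_spec (↑m) 10 1 (by norm_num)
  rw [Nat.length_digits 10 m (by norm_num) (by omega)]
  have hlt' : m < 10 ^ (k + 1) := by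
    have : (m : Int) < 10 ^ (k + 1) := by
      calc (m : Int) < 10 * 10 ^ k := hlt
        _ = 10 ^ (k + 1) := by ring
    exact_mod_cast this
  have hle : 10 ^ k ≤ m := by
    rcases hge with h0 | hge'
    · subst h0; simpa using h
    · rcases Nat.eq_zero_or_pos k with hk0 | hkpos
      · subst hk0; simpa using h
      · obtain ⟨j, rfl⟩ : ∃ j, k = j + 1 := ⟨k - 1, by omega⟩
        have : (10 : Int) ^ (j + 1) ≤ m := by
          calc (10 : Int) ^ (j + 1) = 10 * 10 ^ (j + 1 - 1) := by
                simp [pow_succ]; ring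
            _ ≤ m := hge'
        exact_mod_cast this
  rw [Nat.log_eq_of_pow_le_of_lt_pow hle hlt']
  omega

-- the two per-number sums agree for every nonnegative n
lemma pv_total_eq (n : Int) (hn : 0 ≤ n) :
    ((PySem.List.enumerate (PySem.Int.toChars n)).map
      (fun p => ((PySem.Int.ofChars? [p.2]).getD 0) ^ (p.1 + 1).toNat)).sum
    = pvDigitPowerSum n := by
  obtain ⟨m, rfl⟩ := Int.eq_ofNat_of_zero_le hn
  rcases Nat.eq_zero_or_pos m with hm0 | hmpos
  · subst hm0
    unfold pvDigitPowerSum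
    rw [pvDigitCountLoop.eq_def]
    norm_num [pvSumLoop, PySem.Int.toChars, Nat.toDigits, Nat.toDigitsCore,
      PySem.List.enumerate, PySem.Int.mod]
    decide
  · have htc : PySem.Int.toChars (↑m) = ((Nat.digits 10 m).map Nat.digitChar).reverse := by
      unfold PySem.Int.toChars
      rw [if_neg (by omega), Int.toNat_natCast, pv_toDigits_eq m hmpos]
    rw [htc, ← List.map_reverse,
      pv_sumA_eq ((Nat.digits 10 m).reverse)
        (fun k hk => Nat.digits_lt_base (by norm_num) (List.mem_reverse.mp hk)) 0]
    unfold pvDigitPowerSum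
    rw [pv_count_eq_len m hmpos, pv_sumLoop_eq (Nat.digits 10 m) m 0 rfl]
    simp [pvS]

-- ===== VERDICT (by name: the statement is the Claim_ definition above) =====
theorem find_special_numbers_spec : Claim_equal_find_special_numbers := by
  intro a b _hdom hpre
  unfold Spec_find_special_numbers find_special_numbers find_special_numbers_alt
  apply PySem.List.foldl_congr_mem
  intro acc x hx
  rw [PySem.List.mem_pyRange_one] at hx
  have hx0 : 0 ≤ x := by
    rcases hpre with h | h <;> omega
  simp only []
  rw [pv_total_eq x hx0]
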